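-- pv_equiv track=rewrite | github.com/truehang/wuzifenpei | xunzhaoluxian.py | cheliangzuhe
-- ===== SOURCE A (Python) =====
-- import itertools
--
-- def cheliangzuhe(list1):
--     list2 = []
--     for i in range(1, len(list1)+1):
--         iter1 = itertools.combinations(list1, i)
--         list2.append(list(iter1))
--     list1=list(itertools.chain.from_iterable(list2))
--     list2=[]
--     for i in list1:
--         if not i in list2:
--             list2.append(i)
--     return list2
-- ===== SOURCE B (Python) =====
-- def cheliangzuhe(list1):
--     # DP over the list (right to left): groups[k] holds all k-element
--     # combinations (as tuples, in itertools order), all sizes built in one pass.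
--     groups = [[()]]
--     for x in reversed(list1):
--         out = []
--         for i in range(len(groups)):
--             prev = groups[i]
--             cur = groups[i + 1] if i + 1 < len(groups) else []
--             out.append([(x,) + t for t in prev] + cur)
--         groups = [[()]] + out
--     flat = [t for level in groups[1:] for t in level]
--     seen = []
--     for t in flat:
--         if t not in seen:
--             seen.append(t)
--     return seen
-- ===== Notes on version B (the rewrite author's own statement) =====
-- stated objective: alternative
-- what changed: Replaces the per-size itertools.combinations calls with a single right-to-left DP pass that builds all combination sizes at once via the Pascal-style recurrence C(x::xs,k)=x*C(xs,k-1)++C(xs,k), keeping the same ordering; the final flatten-and-dedup is unchanged.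
import Mathlib
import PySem

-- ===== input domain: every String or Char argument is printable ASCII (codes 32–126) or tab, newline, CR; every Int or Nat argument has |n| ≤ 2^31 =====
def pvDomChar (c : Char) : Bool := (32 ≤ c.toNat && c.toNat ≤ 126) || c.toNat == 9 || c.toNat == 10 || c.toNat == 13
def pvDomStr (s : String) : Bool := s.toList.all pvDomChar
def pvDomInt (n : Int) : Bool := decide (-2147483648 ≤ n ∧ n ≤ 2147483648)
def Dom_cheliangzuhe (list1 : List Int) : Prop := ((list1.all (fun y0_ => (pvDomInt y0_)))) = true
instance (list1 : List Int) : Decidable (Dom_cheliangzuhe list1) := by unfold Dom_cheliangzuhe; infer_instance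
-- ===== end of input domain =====

-- B replaces the per-size itertools.combinations calls by one right-to-left DP pass
-- building all sizes at once (alternative decomposition, same ordering and dedup).

-- ===== PORT A =====
-- itertools.combinations(l, k) in its documented lexicographic-by-position order
def combosA : List Int → Nat → List (List Int)
  | _, 0 => [[]]
  | [], _ + 1 => []
  | x :: xs, k + 1 => (combosA xs k).map (fun t => x :: t) ++ combosA xs (k + 1)

def cheliangzuhe (list1 : List Int) : List (List Int) :=
  -- for i in range(1, len(list1)+1): list2.append(list(combinations(list1, i)))
  let list2 : List (List (List Int)) :=
    (PySem.List.pyRange 1 ((list1.length : Int) + 1) 1).foldl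
      (fun acc i => acc ++ [combosA list1 i.toNat]) []
  -- list1 = chain.from_iterable(list2)
  let flat := list2.flatten
  -- dedup preserving first occurrence
  flat.foldl (fun l2 t => if t ∈ l2 then l2 else l2 ++ [t]) []

-- ===== PORT B =====
-- inner index loop of B: out[i] = prev.map (x :: ·) ++ (groups[i+1] or [])
def stepAux (x : Int) : List (List (List Int)) → List (List (List Int))
  | [] => []
  | prev :: rest => (prev.map (fun t => x :: t) ++ rest.headD []) :: stepAux x rest

def stepB (x : Int) (groups : List (List (List Int))) : List (List (List Int)) :=
  ([[]] : List (List Int)) :: stepAux x groups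

def cheliangzuhe_alt (list1 : List Int) : List (List Int) :=
  -- for x in reversed(list1): groups = [[()]] + out
  let groups := list1.reverse.foldl (fun g x => stepB x g) [[[]]]
  let flat := (groups.drop 1).flatten
  flat.foldl (fun seen t => if t ∈ seen then seen else seen ++ [t]) []

-- ===== PRECONDITION & SPEC =====
def Spec_cheliangzuhe (list1 : List Int) (out : List (List Int)) : Prop := out = cheliangzuhe_alt list1
instance (list1 : List Int) (out : List (List Int)) : Decidable (Spec_cheliangzuhe list1 out) := by unfold Spec_cheliangzuhe; infer_instance

-- ===== CLAIM (what is proved, stated in full; the proofs are below) =====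
def Claim_equal_cheliangzuhe : Prop := ∀ (list1 : List Int), Dom_cheliangzuhe list1 → Spec_cheliangzuhe list1 (cheliangzuhe list1)

-- ===== LEMMAS AND PROOFS =====

theorem stepAux_getD (x : Int) : ∀ (g : List (List (List Int))) (k : Nat),
    ((stepAux x g)[k]?).getD [] =
      ((g[k]?).getD []).map (fun t => x :: t) ++ (g[k + 1]?).getD [] := by
  intro g
  induction g with
  | nil => intro k; simp [stepAux]
  | cons prev rest ih =>
      intro k
      cases k with
      | zero => cases rest <;> simp [stepAux]
      | succ k => simpa [stepAux] using ih k

def Gfold (l : List Int) : List (List (List Int)) :=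
  l.foldr (fun x g => stepB x g) [[[]]]

theorem Gfold_char : ∀ (l : List Int) (k : Nat),
    ((Gfold l)[k]?).getD [] = combosA l k := by
  intro l
  induction l with
  | nil => intro k; cases k <;> simp [Gfold, combosA]
  | cons x xs ih =>
      intro k
      cases k with
      | zero => simp [Gfold, stepB, combosA]
      | succ k =>
          have h : (Gfold (x :: xs))[k + 1]? = (stepAux x (Gfold xs))[k]? := by
            simp [Gfold, stepB]
          rw [h, stepAux_getD x (Gfold xs) k, ih k, ih (k + 1)]
          simp [combosA]

theorem stepAux_length (x : Int) : ∀ (g : List (List (List Int))),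
    (stepAux x g).length = g.length := by
  intro g; induction g with
  | nil => simp [stepAux]
  | cons prev rest ih => simp [stepAux, ih]

theorem Gfold_length (l : List Int) : (Gfold l).length = l.length + 1 := by
  induction l with
  | nil => simp [Gfold]
  | cons x xs ih => simp [Gfold, stepB, stepAux_length] at *; omega

theorem Gfold_drop (l : List Int) :
    (Gfold l).drop 1 = (List.range l.length).map (fun k => combosA l (k + 1)) := by
  apply List.ext_getElem?
  intro k
  by_cases hk : k < l.length
  · have hlen : 1 + k < (Gfold l).length := by rw [Gfold_length]; omega
    rw [List.getElem?_drop]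
    have hsome : (Gfold l)[1 + k]? = some ((Gfold l)[1 + k]'hlen) :=
      List.getElem?_eq_getElem hlen
    have hval : (Gfold l)[1 + k]'hlen = combosA l (k + 1) := by
      have := Gfold_char l (1 + k)
      rw [hsome] at this
      simpa [Nat.add_comm] using this
    rw [hsome, hval]
    simp [List.getElem?_map, List.getElem?_range hk]
  · have h1 : ((Gfold l).drop 1).length ≤ k := by
      simp [Gfold_length]; omega
    have h2 : ((List.range l.length).map (fun k => combosA l (k + 1))).length ≤ k := by
      simp; omega
    rw [List.getElem?_eq_none h1, List.getElem?_eq_none h2]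

theorem foldl_append_map {α β : Type} (f : α → β) :
    ∀ (xs : List α) (acc : List β),
      xs.foldl (fun a i => a ++ [f i]) acc = acc ++ xs.map f := by
  intro xs
  induction xs with
  | nil => intro acc; simp
  | cons x xs ih => intro acc; simp [List.foldl_cons, ih]

theorem listsA_eq (l : List Int) :
    (PySem.List.pyRange 1 ((l.length : Int) + 1) 1).foldl
      (fun acc i => acc ++ [combosA l i.toNat]) [] =
    (List.range l.length).map (fun k => combosA l (k + 1)) := by
  rw [foldl_append_map]
  rw [PySem.List.pyRange_one]
  have h1 : ((l.length : Int) + 1 - 1).toNat = l.length := by omega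
  rw [h1, List.map_map]
  simp only [List.nil_append]
  apply List.map_congr_left
  intro k _
  have : ((1 : Int) + (k : Int)).toNat = k + 1 := by omega
  simp [Function.comp, this]

theorem flats_eq (l : List Int) :
    ((PySem.List.pyRange 1 ((l.length : Int) + 1) 1).foldl
      (fun acc i => acc ++ [combosA l i.toNat]) []).flatten =
    ((l.reverse.foldl (fun g x => stepB x g) [[[]]]).drop 1).flatten := by
  rw [listsA_eq]
  have hG : l.reverse.foldl (fun g x => stepB x g) [[[]]] = Gfold l := by
    rw [List.foldl_reverse]; rfl
  rw [hG, Gfold_drop]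

-- ===== VERDICT (by name: the statement is the Claim_ definition above) =====
theorem cheliangzuhe_spec : Claim_equal_cheliangzuhe := by
  intro list1 _
  show (List.foldl (fun l2 t => if t ∈ l2 then l2 else l2 ++ [t]) []
      ((List.foldl (fun acc i => acc ++ [combosA list1 i.toNat]) []
        (PySem.List.pyRange 1 ((list1.length : Int) + 1) 1)).flatten)) =
    (List.foldl (fun seen t => if t ∈ seen then seen else seen ++ [t]) []
      ((List.drop 1 (List.foldl (fun g x => stepB x g) [[[]]] list1.reverse)).flatten))
  rw [flats_eq]
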